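-- pv_equiv track=rewrite | github.com/mridulrb/Basic-Python-Examples-for-Beginners | Programs/MyPythonXII/Unit1/PyChap03/altsum.py | alternateSum
-- ===== SOURCE A (Python) =====
-- def alternateSum(A, row, col):
--     C = 1
--     Sum = 0
--     for r in range(row):
--         for c in range(col):
--             if (C%2 != 0):
--                 Sum = Sum + A[r][c]
--             C += 1
--     return Sum
-- ===== SOURCE B (Python) =====
-- def alternateSum(A, row, col):
--     # The alternate elements of row r start at (r*col) % 2 -- the parity of the
--     # row's first global row-major index -- so each row's contribution is the sum
--     # of a stride-2 slice, taken at C speed instead of a per-element Python loop.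
--     if col <= 0:
--         return 0
--     total = 0
--     for r in range(row):
--         total += sum(A[r][(r * col) % 2 : col : 2])
--     return total
-- ===== Notes on version B (the rewrite author's own statement) =====
-- stated objective: faster
-- what changed: B drops A's running element counter C and per-element parity branch: each row's alternate elements are a stride-2 slice A[r][(r*col)%2:col:2] summed with built-in sum; Pre_ excludes the degenerate corner where A returns although row exceeds len(A) (only possible when col==1 and the extra row is odd, so A never touches it) because B's row lookup A[r] itself raises there.
-- outside the precondition, e.g. on alternateSum([[5]], 2, 1): A returns 5, B raises IndexError
import Mathlib
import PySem

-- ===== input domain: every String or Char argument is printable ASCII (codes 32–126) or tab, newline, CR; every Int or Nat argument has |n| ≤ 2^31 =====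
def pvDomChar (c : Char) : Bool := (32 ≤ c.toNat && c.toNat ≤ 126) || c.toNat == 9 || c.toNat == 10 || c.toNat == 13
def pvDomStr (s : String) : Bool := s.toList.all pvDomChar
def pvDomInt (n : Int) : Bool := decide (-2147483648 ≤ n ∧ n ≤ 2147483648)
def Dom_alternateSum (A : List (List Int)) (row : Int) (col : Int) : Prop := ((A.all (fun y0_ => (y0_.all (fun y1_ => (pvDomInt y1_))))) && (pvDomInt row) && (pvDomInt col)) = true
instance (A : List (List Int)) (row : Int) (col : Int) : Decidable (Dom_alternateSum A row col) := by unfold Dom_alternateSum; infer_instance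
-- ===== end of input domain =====

-- B replaces A's running element counter and per-element parity branch by summing,
-- per row, the stride-2 slice starting at (r*col) % 2 (objective: faster in Python).

-- ===== PORT A =====
-- literal port of A: state (C, Sum), nested loops over range(row) / range(col);
-- A[r][c] is read only when C is odd, so pyGetD's default is never used under Pre_.
def alternateSum (A : List (List Int)) (row : Int) (col : Int) : Int :=
  ((PySem.List.pyRange 0 row 1).foldl
    (fun (st : Int × Int) (r : Int) =>
      (PySem.List.pyRange 0 col 1).foldl
        (fun (st : Int × Int) (c : Int) =>
          (st.1 + 1,
           if PySem.Int.mod st.1 2 ≠ 0 then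
             st.2 + PySem.List.pyGetD (PySem.List.pyGetD A r []) c 0
           else st.2))
        st)
    (1, 0)).2

-- ===== PORT B =====
-- literal port of Source B: early return for col ≤ 0, then a total accumulator over the
-- rows, each row contributing the sum of its slice A[r][(r*col)%2 : col : 2]
-- (slice? with step 2 is always 'some'; .getD [] only discharges the option).
def alternateSum_alt (A : List (List Int)) (row : Int) (col : Int) : Int :=
  if col ≤ 0 then 0
  else
    (PySem.List.pyRange 0 row 1).foldl
      (fun (total : Int) (r : Int) =>
        total +
          ((PySem.List.slice? (PySem.List.pyGetD A r [])
              (some (PySem.Int.mod (r * col) 2)) (some col) 2).getD []).sum)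
      0

-- ===== PRECONDITION & SPEC =====
-- Pre_: the inputs on which BOTH Pythons return. For col > 0 that is: every row
-- index below 'row' exists (B subscripts A[r] for each r; A does too except in the
-- degenerate corner col = 1, row = len(A)+1 with len(A) odd, where A returns but
-- B's A[r] raises IndexError — that corner is excluded, see claim cites), and each
-- visited row contains its last read cell (index col-1 - ((col-1-start) % 2),
-- start = (r*col) % 2), else A itself raises IndexError.
def Pre_alternateSum (A : List (List Int)) (row : Int) (col : Int) : Prop :=
  col ≤ 0 ∨
  (row ≤ (A.length : Int) ∧
   ∀ q ∈ PySem.List.enumerate A 0, q.1 < row →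
     (col ≤ PySem.Int.mod (q.1 * col) 2 ∨
      col - 1 - PySem.Int.mod (col - 1 - PySem.Int.mod (q.1 * col) 2) 2 < (q.2.length : Int)))
instance (A : List (List Int)) (row : Int) (col : Int) : Decidable (Pre_alternateSum A row col) := by unfold Pre_alternateSum; infer_instance

def pvWitness_alternateSum : List (List Int) × Int × Int := ([[1, 2], [3, 4]], 2, 2)

def Spec_alternateSum (A : List (List Int)) (row : Int) (col : Int) (out : Int) : Prop := out = alternateSum_alt A row col
instance (A : List (List Int)) (row : Int) (col : Int) (out : Int) : Decidable (Spec_alternateSum A row col out) := by unfold Spec_alternateSum; infer_instance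

-- ===== CLAIM (what is proved, stated in full; the proofs are below) =====
def Claim_equal_alternateSum : Prop := ∀ (A : List (List Int)) (row : Int) (col : Int), Dom_alternateSum A row col → Pre_alternateSum A row col → Spec_alternateSum A row col (alternateSum A row col)

-- ===== LEMMAS AND PROOFS =====

-- step-2 ranges, structural forms
theorem pyRange2_nil {a b : Int} (h : b ≤ a) : PySem.List.pyRange a b 2 = [] := by
  rw [PySem.List.pyRange_of_pos a b (by norm_num)]
  simp [show ¬ a < b by omega]

theorem pyRange2_cons {a b : Int} (h : a < b) :
    PySem.List.pyRange a b 2 = a :: PySem.List.pyRange (a + 2) b 2 := by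
  rw [PySem.List.pyRange_of_pos a b (by norm_num),
      PySem.List.pyRange_of_pos (a + 2) b (by norm_num)]
  by_cases h2 : a + 2 < b
  · rw [if_pos h, if_pos h2]
    rw [show ((b - a + 2 - 1) / 2).toNat = ((b - (a + 2) + 2 - 1) / 2).toNat + 1 by omega]
    rw [List.range_succ_eq_map]
    simp [List.map_map, Function.comp]
    intro k _
    ring
  · rw [if_pos h, if_neg h2]
    rw [show ((b - a + 2 - 1) / 2).toNat = 1 by omega]
    simp

-- A's inner loop over range(a, b) from counter C equals C advanced by the length
-- plus the strided sum starting at a (C odd) or a+1 (C even).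
theorem innerA_eq (l : List Int) : ∀ (n : Nat) (a b C S : Int), b - a = n →
    (PySem.List.pyRange a b 1).foldl
      (fun (st : Int × Int) (c : Int) =>
        (st.1 + 1, if PySem.Int.mod st.1 2 ≠ 0 then st.2 + PySem.List.pyGetD l c 0 else st.2))
      (C, S)
    = (C + max (b - a) 0,
       S + (PySem.List.pyRange (if PySem.Int.mod C 2 ≠ 0 then a else a + 1) b 2).foldl
             (fun (s : Int) (c : Int) => s + PySem.List.pyGetD l c 0) 0) := by
  intro n
  induction n with
  | zero =>
    intro a b C S h
    rw [PySem.List.pyRange_one_eq_nil (by omega)]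
    rw [pyRange2_nil (by split_ifs <;> omega)]
    simp [show max (b - a) 0 = 0 by omega]
  | succ m ih =>
    intro a b C S h
    rw [PySem.List.pyRange_one_cons (by omega)]
    simp only [List.foldl_cons]
    rw [ih (a + 1) b _ _ (by omega)]
    have hmod : PySem.Int.mod (C + 1) 2 = 0 ↔ PySem.Int.mod C 2 ≠ 0 := by
      rw [PySem.Int.mod_eq_emod_of_pos (a := C + 1) (by norm_num),
          PySem.Int.mod_eq_emod_of_pos (a := C) (by norm_num)]
      omega
    by_cases hC : PySem.Int.mod C 2 ≠ 0
    · have h1 : PySem.Int.mod (C + 1) 2 = 0 := hmod.mpr hC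
      rw [if_pos hC, if_neg (not_not_intro h1), if_pos hC]
      rw [show a + 1 + 1 = a + 2 by ring]
      rw [pyRange2_cons (show a < b by omega)]
      rw [PySem.List.foldl_add, PySem.List.foldl_add, List.map_cons, List.sum_cons]
      simp only [Prod.mk.injEq]
      exact ⟨by omega, by ring⟩
    · have h1 : PySem.Int.mod (C + 1) 2 ≠ 0 := fun h => hC (hmod.mp h)
      rw [if_neg hC, if_pos h1, if_neg hC]
      simp only [Prod.mk.injEq]
      exact ⟨by omega, by trivial⟩

-- the outer loop, for 0 < col: entering row r the counter is r*col + 1, and the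
-- per-row contribution is the strided row sum starting at (r*col) % 2.
theorem outer_eq (A : List (List Int)) (col : Int) (hcol : 0 < col) :
    ∀ (n : Nat) (r0 S : Int),
    ((PySem.List.pyRange r0 (r0 + n) 1).foldl
      (fun (st : Int × Int) (r : Int) =>
        (PySem.List.pyRange 0 col 1).foldl
          (fun (st : Int × Int) (c : Int) =>
            (st.1 + 1,
             if PySem.Int.mod st.1 2 ≠ 0 then
               st.2 + PySem.List.pyGetD (PySem.List.pyGetD A r []) c 0
             else st.2))
          st)
      (r0 * col + 1, S)).2
    = (PySem.List.pyRange r0 (r0 + n) 1).foldl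
        (fun (total : Int) (r : Int) =>
          total +
            (PySem.List.pyRange (PySem.Int.mod (r * col) 2) col 2).foldl
              (fun (s : Int) (c : Int) =>
                s + PySem.List.pyGetD (PySem.List.pyGetD A r []) c 0)
              0)
        S := by
  intro n
  induction n with
  | zero =>
    intro r0 S
    simp
  | succ m ih =>
    intro r0 S
    rw [show ((m + 1 : Nat) : Int) = (m : Int) + 1 by push_cast; ring]
    rw [PySem.List.pyRange_one_cons (a := r0) (b := r0 + ((m : Int) + 1)) (by omega)]
    simp only [List.foldl_cons]
    rw [innerA_eq (PySem.List.pyGetD A r0 []) (col).toNat 0 col _ _ (by omega)]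
    have hstart : (if PySem.Int.mod (r0 * col + 1) 2 ≠ 0 then (0 : Int) else 0 + 1)
        = PySem.Int.mod (r0 * col) 2 := by
      rw [PySem.Int.mod_eq_emod_of_pos (a := r0 * col + 1) (by norm_num),
          PySem.Int.mod_eq_emod_of_pos (a := r0 * col) (by norm_num)]
      split_ifs with h <;> omega
    rw [hstart]
    have harith : r0 * col + 1 + max (col - 0) 0 = (r0 + 1) * col + 1 := by
      rw [show max (col - 0) 0 = col by omega]; ring
    rw [harith]
    rw [show r0 + ((m : Int) + 1) = (r0 + 1) + (m : Int) by ring]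
    exact ih (r0 + 1) (S + _)

-- the stride-2 slice of a row, when the row contains its last read cell (or the
-- slice is empty), equals the strided-index reads of that row.
theorem sliceSum_eq (xs : List Int) (s col : Int) (hs0 : 0 ≤ s) (hcol : 0 < col)
    (hcond : col ≤ s ∨ col - 1 - PySem.Int.mod (col - 1 - s) 2 < (xs.length : Int)) :
    ((PySem.List.slice? xs (some s) (some col) 2).getD [])
      = (PySem.List.pyRange s col 2).map (fun c => PySem.List.pyGetD xs c 0) := by
  have hmod := PySem.Int.mod_eq_emod_of_pos (a := col - 1 - s) (b := 2) (by norm_num)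
  rw [hmod] at hcond
  unfold PySem.List.slice? PySem.List.sliceIndices
  simp only [show ¬((2:Int) = 0) by norm_num, if_false, show ¬((2:Int) < 0) by norm_num,
    if_pos (show (0:Int) < 2 by norm_num)]
  rw [PySem.List.pyRange_of_pos s col (by norm_num)]
  simp only [if_neg (show ¬ s < 0 by omega), if_neg (show ¬ col < 0 by omega)]
  by_cases hsc : s < col
  · have hlt : col - 1 - (col - 1 - s) % 2 < (xs.length : Int) := by
      rcases hcond with h | h
      · omega
      · exact h
    rw [show min s (xs.length : Int) = s by omega]
    rw [if_pos (show s < min col (xs.length : Int) by omega)]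
    rw [show ((min col (xs.length : Int) - s + 2 - 1) / 2).toNat = ((col - s + 2 - 1) / 2).toNat by omega]
    rw [if_pos hsc]
    simp only [Option.getD_some]
    have hcg : ∀ x ∈ List.range ((col - s + 2 - 1) / 2).toNat,
        xs[(s + 2 * (x : Int)).toNat]? = some (PySem.List.pyGetD xs (s + 2 * (x : Int)) 0) := by
      intro x hx
      have hx' : (x : Int) < (col - s + 2 - 1) / 2 := by
        have := List.mem_range.mp hx; omega
      have hidx : s + 2 * (x : Int) < (xs.length : Int) := by omega
      have hnat : (s + 2 * (x : Int)).toNat < xs.length := by omega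
      rw [List.getElem?_eq_getElem hnat]
      rw [PySem.List.pyGetD_eq_getElem xs 0 (by omega) hidx]
    rw [List.filterMap_congr hcg]
    simp [Function.comp, List.map_map]
  · rw [if_neg (show ¬ min s (xs.length : Int) < min col (xs.length : Int) by omega)]
    rw [if_neg hsc]
    simp

-- ===== VERDICT (by name: the statement is the Claim_ definition above) =====
theorem alternateSum_spec : Claim_equal_alternateSum := by
  intro A row col _ hpre
  unfold Spec_alternateSum alternateSum alternateSum_alt
  by_cases hcol : 0 < col
  · rw [if_neg (by omega)]
    rcases hpre with h | ⟨hlen, hrows⟩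
    · omega
    by_cases hrow : 0 < row
    · have h0 : ((1 : Int), (0 : Int)) = ((0 : Int) * col + 1, (0 : Int)) := by norm_num
      rw [h0, show row = (0 : Int) + (row.toNat : Int) by omega]
      rw [outer_eq A col hcol row.toNat 0 0]
      rw [show (0 : Int) + (row.toNat : Int) = row by omega]
      refine (PySem.List.foldl_congr_mem _ _ _ _ ?_).symm
      intro acc r hr
      have hr' := (PySem.List.mem_pyRange_one (a := 0) (b := row) (x := r)).mp hr
      have hrl : r.toNat < A.length := by omega
      have hA : PySem.List.pyGetD A r [] = A[r.toNat] :=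
        PySem.List.pyGetD_eq_getElem A [] (by omega) (by omega)
      have hq : ((r, A[r.toNat]) : Int × List Int) ∈ PySem.List.enumerate A 0 := by
        rw [PySem.List.mem_enumerate_iff]
        exact ⟨r.toNat, hrl, by simp; omega⟩
      have hc := hrows _ hq (by simpa using hr'.2)
      rw [sliceSum_eq _ _ _ (PySem.Int.mod_nonneg _ (by norm_num)) hcol (by rw [hA]; exact hc)]
      rw [PySem.List.foldl_add]
      simp
    · rw [PySem.List.pyRange_one_eq_nil (a := 0) (b := row) (by omega)]
      simp
  · -- col ≤ 0 : A's inner loop is empty, B returns 0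
    rw [if_pos (by omega)]
    rw [PySem.List.pyRange_one_eq_nil (a := 0) (b := col) (show col ≤ 0 by omega)]
    simp only [List.foldl_nil]
    rw [PySem.List.foldl_ignore]
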